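-- pv_equiv track=rewrite | github.com/wulfebw/algorithms | scripts/array_string_manip/maximize_string_function.py | maximize_string_function_naive_space
-- ===== SOURCE A (Python) =====
-- import collections
--
-- def maximize_string_function_naive_space(s):
--     '''
--     analysis:
--     - O(n^2)
--     '''
--     n = len(s)
--     counts = collections.defaultdict(int)
--     for i in range(n):
--         for j in range(i+1, n+1):
--             counts[s[i:j]] += 1
--
--     best = 0
--     for (k,v) in counts.items():
--         best = max(best, len(k) * v)
--     return best
-- ===== SOURCE B (Python) =====
-- def maximize_string_function_naive_space(s):
--     n = len(s)
--     best = 0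
--     prev = [0] * (n + 1)
--     for i in range(n - 1, -1, -1):
--         # lce DP: cur[j] = longest common extension of suffixes at i and j
--         cur = [(prev[j + 1] + 1 if s[j] == s[i] else 0) for j in range(n)] + [0]
--         # occurrences of s[i:i+L] = number of j with cur[j] >= L; after a
--         # descending sort, picking L = row[k] gives count >= k+1, which is enough
--         row = sorted(cur[:n], reverse=True)
--         for k in range(n):
--             if (k + 1) * row[k] > best:
--                 best = (k + 1) * row[k]
--         prev = cur
--     return best
-- ===== Notes on version B (the rewrite author's own statement) =====
-- stated objective: faster
-- what changed: B never materializes substrings or a counter: it computes longest-common-extension values lce(i,j) via the DP lce(i,j)=lce(i+1,j+1)+1 when s[i]==s[j], carried as one row per start i, and for each i sorts the row descending so that max over L of L*occurrences(s[i:i+L]) equals max over k of (k+1)*row[k].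
import Mathlib
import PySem

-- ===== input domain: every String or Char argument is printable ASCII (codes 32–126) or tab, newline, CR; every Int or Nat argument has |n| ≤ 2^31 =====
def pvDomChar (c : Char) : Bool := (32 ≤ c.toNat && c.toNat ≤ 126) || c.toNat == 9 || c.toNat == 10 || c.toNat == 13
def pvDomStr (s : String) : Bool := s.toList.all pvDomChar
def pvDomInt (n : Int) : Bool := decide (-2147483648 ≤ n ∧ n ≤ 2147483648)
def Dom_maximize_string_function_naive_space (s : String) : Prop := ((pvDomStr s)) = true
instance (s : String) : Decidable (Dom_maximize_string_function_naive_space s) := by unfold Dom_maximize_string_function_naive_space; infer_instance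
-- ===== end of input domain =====

-- B replaces A's dict of all substrings by a longest-common-extension DP with one descending-sorted row per start position (faster: O(n^2 log n) vs A's O(n^3)); return values proved equal.


-- ===== PORT A =====
def maximize_string_function_naive_space (s : String) : Int :=
  let n : Int := PySem.Str.len s
  let counts : PySem.Dict String Int :=
    (PySem.List.pyRange 0 n).foldl (fun counts i =>
      (PySem.List.pyRange (i + 1) (n + 1)).foldl (fun counts j =>
        counts.modify (PySem.Str.slice s (some i) (some j)) 0 (· + 1)) counts)
      PySem.Dict.empty
  counts.items.foldl (fun best kv => max best (PySem.Str.len kv.1 * kv.2)) 0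

-- ===== PORT B =====
def maximize_string_function_naive_space_alt (s : String) : Int :=
  let n : Int := PySem.Str.len s
  let res :=
    (PySem.List.pyRange (n - 1) (-1) (-1)).foldl
      (fun (st : Int × List Int) i =>
        let cur : List Int :=
          ((PySem.List.pyRange 0 n).map (fun j =>
            if PySem.Str.pyGet? s j == PySem.Str.pyGet? s i
            then PySem.List.pyGetD st.2 (j + 1) 0 + 1 else 0)) ++ [0]
        let row := PySem.List.sorted (PySem.List.slice cur none (some n)) (fun x => x) true
        let best :=
          (PySem.List.pyRange 0 n).foldl
            (fun b k =>
              if (k + 1) * PySem.List.pyGetD row k 0 > b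
              then (k + 1) * PySem.List.pyGetD row k 0 else b) st.1
        (best, cur))
      (0, PySem.List.pyRepeat [0] (n + 1))
  res.1

-- ===== PRECONDITION & SPEC =====
def Spec_maximize_string_function_naive_space (s : String) (out : Int) : Prop := out = maximize_string_function_naive_space_alt s
instance (s : String) (out : Int) : Decidable (Spec_maximize_string_function_naive_space s out) := by unfold Spec_maximize_string_function_naive_space; infer_instance

-- ===== CLAIM (what is proved, stated in full; the proofs are below) =====
def Claim_equal_maximize_string_function_naive_space : Prop := ∀ (s : String), Dom_maximize_string_function_naive_space s → Spec_maximize_string_function_naive_space s (maximize_string_function_naive_space s)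

-- ===== LEMMAS AND PROOFS =====

-- ---------- A-side: A's result is the max of len(k)*count(k) over the distinct substrings ----------

-- the list of substrings A feeds to its dict, start-major
def pvSubsA (s : String) : List String :=
  (PySem.List.pyRange 0 (PySem.Str.len s)).flatMap (fun i =>
    (PySem.List.pyRange (i + 1) (PySem.Str.len s + 1)).map (fun j => PySem.Str.slice s (some i) (some j)))

-- the substrings of one fixed length L
def pvSubsL (s : String) (L : Int) : List String :=
  (PySem.List.pyRange 0 (PySem.Str.len s - L + 1)).map (fun i => PySem.Str.slice s (some i) (some (i + L)))

-- the value A's final fold maximises for a key k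
def pvF (s : String) (k : String) : Int := PySem.Str.len k * (List.count k (pvSubsA s) : Int)

-- index pairs (start, end), start-major (A's order) and length-major
def pvPairsA (s : String) : List (Int × Int) :=
  (PySem.List.pyRange 0 (PySem.Str.len s)).flatMap (fun i =>
    (PySem.List.pyRange (i + 1) (PySem.Str.len s + 1)).map (fun j => (i, j)))

def pvPairsB (s : String) : List (Int × Int) :=
  (PySem.List.pyRange 1 (PySem.Str.len s + 1)).flatMap (fun L =>
    (PySem.List.pyRange 0 (PySem.Str.len s - L + 1)).map (fun i => (i, i + L)))

theorem pv_foldl_flatMap {α β γ : Type} (g : α → List β) (f : γ → β → γ) (l : List α) (b : γ) :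
    (l.flatMap g).foldl f b = l.foldl (fun b a => (g a).foldl f b) b := by
  induction l generalizing b with
  | nil => rfl
  | cons x xs ih => simp [List.flatMap_cons, List.foldl_append, ih]

-- length of the slice s[i : i+L]
theorem pv_slice_len (s : String) (i L : Int) (h0 : 0 ≤ i) (hL : 0 ≤ L)
    (hn : i + L ≤ PySem.Str.len s) :
    PySem.Str.len (PySem.Str.slice s (some i) (some (i + L))) = L := by
  have h1 : i = ((i.toNat : Nat) : Int) := by omega
  have h2 : i + L = (((i.toNat + L.toNat) : Nat) : Int) := by push_cast; omega
  have hns : PySem.Str.len s = (s.toList.length : Int) := PySem.Str.len_eq s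
  rw [PySem.Str.len_eq, PySem.Str.toList_slice, PySem.Chars.slice_eq_listSlice, h2, h1,
    PySem.List.slice_natCast]
  simp only [Int.toNat_natCast, List.length_take, List.length_drop]
  omega

theorem pv_mem_subsL_iff (s : String) (L : Int) (k : String) :
    k ∈ pvSubsL s L ↔ ∃ i : Int, 0 ≤ i ∧ i + L ≤ PySem.Str.len s ∧
      k = PySem.Str.slice s (some i) (some (i + L)) := by
  rw [pvSubsL]
  constructor
  · intro hk
    obtain ⟨i, hi, rfl⟩ := List.mem_map.1 hk
    obtain ⟨hi0, hi1⟩ := PySem.List.mem_pyRange_one.1 hi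
    exact ⟨i, hi0, by omega, rfl⟩
  · rintro ⟨i, hi0, hin, rfl⟩
    exact List.mem_map.2 ⟨i, PySem.List.mem_pyRange_one.2 ⟨hi0, by omega⟩, rfl⟩

-- every element of pvSubsL s L has length L (for 0 ≤ L ≤ n)
theorem pv_len_mem (s : String) (L : Int) (hL : 0 ≤ L)
    (k : String) (hk : k ∈ pvSubsL s L) : PySem.Str.len k = L := by
  obtain ⟨i, hi0, hin, rfl⟩ := (pv_mem_subsL_iff s L k).1 hk
  exact pv_slice_len s i L hi0 hL hin

theorem pv_subsA_map (s : String) :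
    pvSubsA s = (pvPairsA s).map (fun p => PySem.Str.slice s (some p.1) (some p.2)) := by
  simp [pvSubsA, pvPairsA, List.map_flatMap, List.map_map, Function.comp_def]

theorem pv_cat_map (s : String) :
    (PySem.List.pyRange 1 (PySem.Str.len s + 1)).flatMap (fun L => pvSubsL s L)
      = (pvPairsB s).map (fun p => PySem.Str.slice s (some p.1) (some p.2)) := by
  simp [pvSubsL, pvPairsB, List.map_flatMap, List.map_map, Function.comp_def]

theorem pv_nodup_pairsA (s : String) : (pvPairsA s).Nodup := by
  rw [pvPairsA, List.nodup_flatMap]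
  refine ⟨fun i _ => List.Nodup.map (fun x y h => by injection h) (PySem.List.nodup_pyRange_one _ _), ?_⟩
  refine List.Pairwise.imp ?_ (PySem.List.nodup_pyRange_one 0 (PySem.Str.len s))
  intro i i' hne p hp hp'
  obtain ⟨j, _, rfl⟩ := List.mem_map.1 hp
  obtain ⟨j', _, hj'⟩ := List.mem_map.1 hp'
  exact hne (by injection hj'.symm)

theorem pv_nodup_pairsB (s : String) : (pvPairsB s).Nodup := by
  rw [pvPairsB, List.nodup_flatMap]
  refine ⟨fun L _ => List.Nodup.map (fun x y h => by injection h) (PySem.List.nodup_pyRange_one _ _), ?_⟩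
  refine List.Pairwise.imp ?_ (PySem.List.nodup_pyRange_one 1 (PySem.Str.len s + 1))
  intro L L' hne p hp hp'
  obtain ⟨i, _, rfl⟩ := List.mem_map.1 hp
  obtain ⟨i', _, hj'⟩ := List.mem_map.1 hp'
  have h1 : i' = i := by injection hj'
  have h2 : i' + L' = i + L := by injection hj'
  exact hne (by omega)

theorem pv_pairs_perm (s : String) : (pvPairsA s).Perm (pvPairsB s) := by
  refine (List.perm_ext_iff_of_nodup (pv_nodup_pairsA s) (pv_nodup_pairsB s)).2 ?_
  intro p
  have hA : p ∈ pvPairsA s ↔ 0 ≤ p.1 ∧ p.1 < p.2 ∧ p.2 ≤ PySem.Str.len s := by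
    rw [pvPairsA]
    constructor
    · intro hp
      obtain ⟨i, hi, hp2⟩ := List.mem_flatMap.1 hp
      obtain ⟨j, hj, rfl⟩ := List.mem_map.1 hp2
      obtain ⟨hi0, hi1⟩ := PySem.List.mem_pyRange_one.1 hi
      obtain ⟨hj0, hj1⟩ := PySem.List.mem_pyRange_one.1 hj
      exact ⟨hi0, by omega, by omega⟩
    · rintro ⟨h1, h2, h3⟩
      refine List.mem_flatMap.2 ⟨p.1, PySem.List.mem_pyRange_one.2 ⟨h1, by omega⟩,
        List.mem_map.2 ⟨p.2, PySem.List.mem_pyRange_one.2 ⟨by omega, by omega⟩, rfl⟩⟩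
  have hB : p ∈ pvPairsB s ↔ 0 ≤ p.1 ∧ p.1 < p.2 ∧ p.2 ≤ PySem.Str.len s := by
    rw [pvPairsB]
    constructor
    · intro hp
      obtain ⟨L, hL, hp2⟩ := List.mem_flatMap.1 hp
      obtain ⟨i, hi, rfl⟩ := List.mem_map.1 hp2
      obtain ⟨hL0, hL1⟩ := PySem.List.mem_pyRange_one.1 hL
      obtain ⟨hi0, hi1⟩ := PySem.List.mem_pyRange_one.1 hi
      exact ⟨hi0, by omega, by omega⟩
    · rintro ⟨h1, h2, h3⟩
      refine List.mem_flatMap.2 ⟨p.2 - p.1, PySem.List.mem_pyRange_one.2 ⟨by omega, by omega⟩,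
        List.mem_map.2 ⟨p.1, PySem.List.mem_pyRange_one.2 ⟨h1, by omega⟩,
          by
            have hpp : p.1 + (p.2 - p.1) = p.2 := by omega
            rw [hpp]⟩⟩
  rw [hA, hB]

theorem pv_subs_perm (s : String) :
    (pvSubsA s).Perm ((PySem.List.pyRange 1 (PySem.Str.len s + 1)).flatMap (fun L => pvSubsL s L)) := by
  rw [pv_subsA_map, pv_cat_map]
  exact (pv_pairs_perm s).map _

theorem pv_count_flat (s : String) (k : String) (L : Int) :
    ∀ (Ls : List Int), Ls.Nodup → L ∈ Ls → (∀ L' ∈ Ls, L' ≠ L → k ∉ pvSubsL s L') →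
      List.count k (Ls.flatMap (fun L' => pvSubsL s L')) = List.count k (pvSubsL s L) := by
  intro Ls
  induction Ls with
  | nil => intro _ h; simp at h
  | cons a as ih =>
    intro hnd hmem hnot
    rw [List.flatMap_cons, List.count_append]
    by_cases ha : a = L
    · subst ha
      have h0 : List.count k (as.flatMap (fun L' => pvSubsL s L')) = 0 := by
        refine List.count_eq_zero.2 (fun hm => ?_)
        obtain ⟨L', hL', hk'⟩ := List.mem_flatMap.1 hm
        have hne : L' ≠ a := by rintro rfl; exact (List.nodup_cons.1 hnd).1 hL'
        exact hnot L' (List.mem_cons_of_mem _ hL') hne hk'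
      rw [h0]
      omega
    · have h0 : List.count k (pvSubsL s a) = 0 :=
        List.count_eq_zero.2 (hnot a List.mem_cons_self ha)
      have hmem' : L ∈ as := by
        rcases List.mem_cons.1 hmem with h | h
        · exact absurd h.symm ha
        · exact h
      rw [h0, ih (List.nodup_cons.1 hnd).2 hmem'
        (fun L' h' => hnot L' (List.mem_cons_of_mem _ h'))]
      omega

-- counting a length-L substring in A's list equals counting it among the length-L slices
theorem pv_count_eq (s : String) (L : Int) (hL : 1 ≤ L) (hLn : L ≤ PySem.Str.len s)
    (k : String) (hk : k ∈ pvSubsL s L) :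
    List.count k (pvSubsA s) = List.count k (pvSubsL s L) := by
  rw [(pv_subs_perm s).count_eq k]
  refine pv_count_flat s k L _ (PySem.List.nodup_pyRange_one _ _)
    (PySem.List.mem_pyRange_one.2 ⟨hL, by omega⟩) ?_
  intro L' hL' hne hkmem
  obtain ⟨hL'0, hL'1⟩ := PySem.List.mem_pyRange_one.1 hL'
  have e1 := pv_len_mem s L' (by omega) k hkmem
  have e2 := pv_len_mem s L (by omega) k hk
  omega

-- A's result, structurally: fold of pvF over the distinct substrings
theorem pvA_eq (s : String) :
    maximize_string_function_naive_space s
      = List.foldl max 0 ((PySem.Set.ofList (pvSubsA s) : List String).map (pvF s)) := by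
  have hd : ((PySem.List.pyRange 0 (PySem.Str.len s)).foldl (fun counts i =>
      (PySem.List.pyRange (i + 1) (PySem.Str.len s + 1)).foldl (fun counts j =>
        counts.modify (PySem.Str.slice s (some i) (some j)) 0 (· + 1)) counts)
      PySem.Dict.empty) = PySem.Dict.counter (pvSubsA s) := by
    rw [PySem.Dict.counter_eq_foldl, pvSubsA, pv_foldl_flatMap]
    simp [List.foldl_map]
  rw [show maximize_string_function_naive_space s
      = (((PySem.List.pyRange 0 (PySem.Str.len s)).foldl (fun counts i =>
          (PySem.List.pyRange (i + 1) (PySem.Str.len s + 1)).foldl (fun counts j =>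
            counts.modify (PySem.Str.slice s (some i) (some j)) 0 (· + 1)) counts)
          PySem.Dict.empty).items).foldl
            (fun best kv => max best (PySem.Str.len kv.1 * kv.2)) 0 from rfl,
    hd, PySem.Dict.items_counter, List.foldl_map, List.foldl_map]
  simp [pvF]

-- membership in A's substring list, in (start, length) form over ℕ
theorem pv_mem_subsA_iff (s : String) (k : String) :
    k ∈ pvSubsA s ↔ ∃ i L : Nat, 1 ≤ L ∧ (i : Int) + L ≤ PySem.Str.len s ∧
      k = PySem.Str.slice s (some (i : Int)) (some ((i : Int) + (L : Int))) := by
  rw [pvSubsA]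
  constructor
  · intro hk
    obtain ⟨i, hi, hk2⟩ := List.mem_flatMap.1 hk
    obtain ⟨j, hj, rfl⟩ := List.mem_map.1 hk2
    obtain ⟨hi0, hi1⟩ := PySem.List.mem_pyRange_one.1 hi
    obtain ⟨hj0, hj1⟩ := PySem.List.mem_pyRange_one.1 hj
    refine ⟨i.toNat, (j - i).toNat, by omega, by omega, ?_⟩
    have e1 : ((i.toNat : Nat) : Int) = i := by omega
    have e2 : ((i.toNat : Nat) : Int) + (((j - i).toNat : Nat) : Int) = j := by omega
    rw [e2, e1]
  · rintro ⟨i, L, hL, hn, rfl⟩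
    refine List.mem_flatMap.2 ⟨(i : Int), PySem.List.mem_pyRange_one.2 ⟨by omega, by omega⟩,
      List.mem_map.2 ⟨(i : Int) + (L : Int), PySem.List.mem_pyRange_one.2 ⟨by omega, by omega⟩, rfl⟩⟩

-- ---------- longest common extensions ----------

def pvLcp : List Char → List Char → Nat
  | a :: as, b :: bs => if a = b then pvLcp as bs + 1 else 0
  | _, _ => 0

theorem pvLcp_nil_right (xs : List Char) : pvLcp xs [] = 0 := by
  cases xs <;> rfl

theorem pvLcp_le_left (xs : List Char) : ∀ ys, pvLcp xs ys ≤ xs.length := by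
  induction xs with
  | nil => intro ys; cases ys <;> simp [pvLcp]
  | cons a as ih =>
    intro ys
    cases ys with
    | nil => simp [pvLcp_nil_right]
    | cons b bs =>
      by_cases h : a = b <;> simp [pvLcp, h]
      exact ih bs

theorem pvLcp_comm (xs : List Char) : ∀ ys, pvLcp xs ys = pvLcp ys xs := by
  induction xs with
  | nil => intro ys; cases ys <;> rfl
  | cons a as ih =>
    intro ys
    cases ys with
    | nil => rfl
    | cons b bs =>
      by_cases h : a = b
      · subst h; simp [pvLcp, ih bs]
      · have h' : ¬ b = a := fun hh => h hh.symm
        simp [pvLcp, h, h']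

theorem pvLcp_self (xs : List Char) : pvLcp xs xs = xs.length := by
  induction xs with
  | nil => rfl
  | cons a as ih => simp [pvLcp, ih]

theorem pv_take_eq_iff : ∀ (L : Nat) (xs ys : List Char), L ≤ xs.length →
    (xs.take L = ys.take L ↔ L ≤ pvLcp xs ys) := by
  intro L
  induction L with
  | zero => intro xs ys _; simp
  | succ L ih =>
    intro xs ys hlen
    cases xs with
    | nil => simp at hlen
    | cons x xs' =>
      cases ys with
      | nil =>
        simp only [List.take_nil, pvLcp_nil_right]
        constructor
        · intro h; simp [List.take_succ_cons] at h
        · omega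
      | cons y ys' =>
        simp only [List.take_succ_cons, List.cons.injEq]
        by_cases hxy : x = y
        · subst hxy
          have hp : pvLcp (x :: xs') (x :: ys') = pvLcp xs' ys' + 1 := by simp [pvLcp]
          have hl : L ≤ xs'.length := by simpa using hlen
          rw [hp]
          constructor
          · rintro ⟨_, h⟩
            have := (ih xs' ys' hl).1 h
            omega
          · intro h
            exact ⟨rfl, (ih xs' ys' hl).2 (by omega)⟩
        · simp only [pvLcp, if_neg hxy]
          constructor
          · rintro ⟨h, _⟩; exact absurd h hxy
          · omega

def pvLce (cs : List Char) (i j : Nat) : Nat := pvLcp (cs.drop i) (cs.drop j)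

theorem pvLce_le_left (cs : List Char) (i j : Nat) : pvLce cs i j ≤ cs.length - i := by
  have := pvLcp_le_left (cs.drop i) (cs.drop j)
  simpa [pvLce] using this

theorem pvLce_self (cs : List Char) (i : Nat) : pvLce cs i i = cs.length - i := by
  simp [pvLce, pvLcp_self]

theorem pvLce_len_right (cs : List Char) (i : Nat) : pvLce cs i cs.length = 0 := by
  simp [pvLce, List.drop_length, pvLcp_nil_right]

theorem pvLce_rec (cs : List Char) (i j : Nat) (hi : i < cs.length) (hj : j < cs.length) :
    pvLce cs i j = if cs[i] = cs[j] then pvLce cs (i + 1) (j + 1) + 1 else 0 := by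
  rw [pvLce, List.drop_eq_getElem_cons hi, List.drop_eq_getElem_cons hj]
  rfl

-- slice equality is an lce bound
theorem pv_slice_eq_iff (s : String) (i j L : Nat) (hiL : i + L ≤ s.toList.length) :
    (PySem.Str.slice s (some (j : Int)) (some ((j : Int) + (L : Int)))
      = PySem.Str.slice s (some (i : Int)) (some ((i : Int) + (L : Int))))
      ↔ L ≤ pvLce s.toList j i := by
  rw [← String.toList_inj, PySem.Str.toList_slice, PySem.Str.toList_slice,
    PySem.Chars.slice_eq_listSlice, PySem.Chars.slice_eq_listSlice,
    PySem.List.slice_natCast_add, PySem.List.slice_natCast_add]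
  rw [eq_comm, pv_take_eq_iff L _ _ (by rw [List.length_drop]; omega), pvLce, pvLcp_comm]

-- number of occurrences of s[i:i+L], as an lce count
def pvCnt (cs : List Char) (i L : Nat) : Nat :=
  (List.range cs.length).countP (fun j => decide (L ≤ pvLce cs j i))

-- the value A maximises for the substring s[i:i+L]
theorem pv_fA (s : String) (i L : Nat) (hL : 1 ≤ L) (hiL : (i : Int) + L ≤ PySem.Str.len s) :
    pvF s (PySem.Str.slice s (some (i : Int)) (some ((i : Int) + (L : Int))))
      = (L : Int) * (pvCnt s.toList i L : Int) := by
  have hn : PySem.Str.len s = (s.toList.length : Int) := PySem.Str.len_eq s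
  set n : Nat := s.toList.length with hndef
  have hiLn : i + L ≤ n := by omega
  set k := PySem.Str.slice s (some (i : Int)) (some ((i : Int) + (L : Int))) with hkdef
  have hkmem : k ∈ pvSubsL s (L : Int) :=
    (pv_mem_subsL_iff s (L : Int) k).2 ⟨(i : Int), by omega, by omega, rfl⟩
  have hlen : PySem.Str.len k = (L : Int) := pv_len_mem s (L : Int) (by omega) k hkmem
  rw [pvF, hlen, pv_count_eq s (L : Int) (by omega) (by omega) k hkmem]
  congr 1
  -- count over the length-L slices = countP over all starts via lce
  have hrw : PySem.Str.len s - (L : Int) + 1 = (((n - L + 1 : Nat)) : Int) := by push_cast; omega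
  rw [pvSubsL, hrw, PySem.List.pyRange_zero_natCast, List.map_map, List.count_eq_countP,
    List.countP_map]
  have hcongr : ∀ a ∈ List.range (n - L + 1),
      (((fun x => x == k) ∘ (fun i' => PySem.Str.slice s (some i') (some (i' + (L : Int)))) ∘ (fun (t : Nat) => (t : Int))) a = true
        ↔ (fun j => decide (L ≤ pvLce s.toList j i)) a = true) := by
    intro a _
    simp only [Function.comp_apply, beq_iff_eq, decide_eq_true_eq]
    rw [hkdef]
    exact pv_slice_eq_iff s i a L hiLn
  rw [List.countP_congr hcongr, pvCnt]
  -- extend the start range from n-L+1 to n: late starts have lce < L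
  have hsplit : List.range n = List.range (n - L + 1) ++ (List.range (L - 1)).map (fun t => (n - L + 1) + t) := by
    have h' : n = (n - L + 1) + (L - 1) := by omega
    conv_lhs => rw [h']
    rw [List.range_add]
  rw [hsplit, List.countP_append]
  have hz : ((List.range (L - 1)).map (fun t => (n - L + 1) + t)).countP
      (fun j => decide (L ≤ pvLce s.toList j i)) = 0 := by
    refine List.countP_eq_zero.2 ?_
    intro j hj
    obtain ⟨t, ht, rfl⟩ := List.mem_map.1 hj
    have ht' : t < L - 1 := List.mem_range.1 ht
    have hle : pvLce s.toList ((n - L + 1) + t) i ≤ n - ((n - L + 1) + t) := pvLce_le_left _ _ _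
    simp only [decide_eq_true_eq]
    omega
  omega

-- ---------- B-side structure ----------

def pvRow (cs : List Char) (i : Nat) : List Int :=
  (List.range (cs.length + 1)).map (fun j => (pvLce cs i j : Int))

def pvSRow (cs : List Char) (i : Nat) : List Int :=
  PySem.List.sorted ((List.range cs.length).map (fun j => (pvLce cs i j : Int))) (fun x => x) true

def pvVals (cs : List Char) (i : Nat) : List Int :=
  (List.range cs.length).map (fun (k : Nat) => ((k : Int) + 1) * PySem.List.pyGetD (pvSRow cs i) ((k : Nat) : Int) 0)

theorem pv_length_sRow (cs : List Char) (i : Nat) : (pvSRow cs i).length = cs.length := by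
  simp [pvSRow, PySem.List.length_sorted]

theorem pv_sRow_desc (cs : List Char) (i : Nat) :
    (pvSRow cs i).Pairwise (fun a b => b ≤ a) :=
  PySem.List.sorted_pairwise_rev _ _

-- the count of entries ≥ L in the sorted row is pvCnt
theorem pv_countP_sRow (cs : List Char) (i : Nat) (L : Nat) :
    (pvSRow cs i).countP (fun v => decide ((L : Int) ≤ v)) = pvCnt cs i L := by
  rw [pvSRow, (PySem.List.sorted_perm _ _ _).countP_eq, List.countP_map, pvCnt]
  refine List.countP_congr ?_
  intro j _
  simp only [Function.comp_apply, decide_eq_true_eq]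
  have hc : pvLce cs i j = pvLce cs j i := by rw [pvLce, pvLce, pvLcp_comm]
  rw [Nat.cast_le, hc]

-- in a descending list, an entry ≥ L at index k forces at least k+1 entries ≥ L
theorem pv_sorted_count_ge (w : List Int) (hw : w.Pairwise (fun a b => b ≤ a))
    (k : Nat) (hk : k < w.length) (L : Int) (hL : L ≤ w[k]) :
    k + 1 ≤ w.countP (fun v => decide (L ≤ v)) := by
  have hsplit : w = w.take (k + 1) ++ w.drop (k + 1) := (List.take_append_drop _ _).symm
  have hlen : (w.take (k + 1)).length = k + 1 := by simp; omega
  have hall : (w.take (k + 1)).countP (fun v => decide (L ≤ v)) = (w.take (k + 1)).length := by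
    refine List.countP_eq_length.2 ?_
    intro a ha
    obtain ⟨p, hp, rfl⟩ := List.mem_iff_getElem.1 ha
    have hp' : p < k + 1 := by simpa [hlen] using hp
    have hpe : (w.take (k + 1))[p] = w[p]'(by omega) := List.getElem_take
    rw [hpe]
    simp only [decide_eq_true_eq]
    rcases Nat.lt_or_ge p k with h | h
    · exact le_trans hL (List.pairwise_iff_getElem.1 hw p k (by omega) hk h)
    · have : p = k := by omega
      subst this; exact hL
  calc k + 1 = (w.take (k + 1)).countP (fun v => decide (L ≤ v)) := by rw [hall, hlen]
    _ ≤ _ := by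
        conv_rhs => rw [hsplit]
        rw [List.countP_append]; omega

-- in a descending list with exactly c ≥ 1 entries ≥ L, the entry at index c-1 is ≥ L
theorem pv_sorted_getElem_ge (w : List Int) (hw : w.Pairwise (fun a b => b ≤ a))
    (L : Int) (c : Nat) (hc : w.countP (fun v => decide (L ≤ v)) = c) (h1 : 1 ≤ c)
    (hlt : c - 1 < w.length) :
    L ≤ w[c - 1] := by
  by_contra hcon
  push_neg at hcon
  have hdz : (w.drop (c - 1)).countP (fun v => decide (L ≤ v)) = 0 := by
    refine List.countP_eq_zero.2 ?_
    intro a ha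
    obtain ⟨q, hq, rfl⟩ := List.mem_iff_getElem.1 ha
    have hqe : (w.drop (c - 1))[q] = w[c - 1 + q]'(by simp at hq ⊢; omega) := List.getElem_drop ..
    rw [hqe]
    simp only [decide_eq_true_eq]
    push_neg
    rcases Nat.eq_zero_or_pos q with h | h
    · subst h; simpa using hcon
    · exact lt_of_le_of_lt
        (List.pairwise_iff_getElem.1 hw (c - 1) (c - 1 + q) hlt (by simp at hq ⊢; omega) (by omega))
        hcon
  have hsplit : w = w.take (c - 1) ++ w.drop (c - 1) := (List.take_append_drop _ _).symm
  have : w.countP (fun v => decide (L ≤ v)) ≤ c - 1 := by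
    conv_lhs => rw [hsplit]
    rw [List.countP_append, hdz]
    have := List.countP_le_length (p := fun v => decide (L ≤ v)) (l := w.take (c - 1))
    simp at this
    omega
  omega

-- the inner k-loop of B is a running max over pvVals
theorem pv_inner (s : String) (row : List Int) (b : Int) :
    (PySem.List.pyRange 0 (PySem.Str.len s)).foldl
      (fun b k =>
        if (k + 1) * PySem.List.pyGetD row k 0 > b
        then (k + 1) * PySem.List.pyGetD row k 0 else b) b
      = List.foldl max b ((List.range s.toList.length).map
          (fun (k : Nat) => ((k : Int) + 1) * PySem.List.pyGetD row ((k : Nat) : Int) 0)) := by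
  have key : ∀ (l : List Nat) (b : Int),
      (l.map (fun (k : Nat) => (k : Int))).foldl
        (fun b k =>
          if (k + 1) * PySem.List.pyGetD row k 0 > b
          then (k + 1) * PySem.List.pyGetD row k 0 else b) b
        = List.foldl max b (l.map (fun (k : Nat) => ((k : Int) + 1) * PySem.List.pyGetD row ((k : Nat) : Int) 0)) := by
    intro l
    induction l with
    | nil => intro b; rfl
    | cons x xs ih =>
      intro b
      simp only [List.map_cons, List.foldl_cons]
      rw [ih]
      congr 1
      split_ifs with h
      · exact (max_eq_right h.le).symm
      · exact (max_eq_left (not_lt.1 h)).symm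
  rw [PySem.Str.len_eq, PySem.List.pyRange_zero_natCast]
  exact key _ b

-- the row B computes for start i, given the row for start i+1
theorem pv_cur (s : String) (m : Nat) (hm : m < s.toList.length) :
    ((PySem.List.pyRange 0 (PySem.Str.len s)).map (fun j =>
      if PySem.Str.pyGet? s j == PySem.Str.pyGet? s (m : Int)
      then PySem.List.pyGetD (pvRow s.toList (m + 1)) (j + 1) 0 + 1 else 0)) ++ [0]
      = pvRow s.toList m := by
  set cs := s.toList with hcs
  set n := cs.length with hn
  have hrow : pvRow cs m = (List.range n).map (fun j => (pvLce cs m j : Int)) ++ [(pvLce cs m n : Int)] := by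
    rw [pvRow, List.range_succ, List.map_append, List.map_cons, List.map_nil]
  rw [hrow, pvLce_len_right, Nat.cast_zero, PySem.Str.len_eq, ← hcs, ← hn,
    PySem.List.pyRange_zero_natCast, List.map_map]
  congr 1
  refine List.map_congr_left ?_
  intro j hj
  have hjn : j < n := List.mem_range.1 hj
  simp only [Function.comp_apply]
  have hg1 : PySem.Str.pyGet? s (j : Int) = some cs[j] := by
    rw [show PySem.Str.pyGet? s (j : Int) = PySem.List.pyGet? s.toList (j : Int) from by
          simp [PySem.Str.pyGet?],
      PySem.List.pyGet?_natCast, ← hcs]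
    exact List.getElem?_eq_getElem hjn
  have hg2 : PySem.Str.pyGet? s (m : Int) = some cs[m] := by
    rw [show PySem.Str.pyGet? s (m : Int) = PySem.List.pyGet? s.toList (m : Int) from by
          simp [PySem.Str.pyGet?],
      PySem.List.pyGet?_natCast, ← hcs]
    exact List.getElem?_eq_getElem hm
  have hgd : PySem.List.pyGetD (pvRow cs (m + 1)) ((j : Int) + 1) 0 = (pvLce cs (m + 1) (j + 1) : Int) := by
    have : ((j : Int) + 1) = (((j + 1 : Nat)) : Int) := by push_cast; ring
    rw [this, PySem.List.pyGetD_natCast, pvRow, PySem.List.getD_map_range _ _ _ _ (by omega)]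
  rw [hg1, hg2, hgd, pvLce_rec cs m j hm hjn]
  by_cases h : cs[j] = cs[m]
  · simp [h]
  · have h' : ¬ cs[m] = cs[j] := fun hh => h hh.symm
    simp [h, h']

-- the sorted row built by the port
theorem pv_row_sorted (s : String) (m : Nat) :
    PySem.List.sorted (PySem.List.slice (pvRow s.toList m) none (some (PySem.Str.len s))) (fun x => x) true
      = pvSRow s.toList m := by
  rw [PySem.Str.len_eq, PySem.List.slice_to_natCast, pvRow, ← List.map_take, List.take_range]
  have hmin : min s.toList.length (s.toList.length + 1) = s.toList.length := by omega
  rw [hmin, pvSRow]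

-- B's outer loop as a named step function (definitionally the port's lambda)
def pvStep (s : String) (st : Int × List Int) (i : Int) : Int × List Int :=
  let cur : List Int :=
    ((PySem.List.pyRange 0 (PySem.Str.len s)).map (fun j =>
      if PySem.Str.pyGet? s j == PySem.Str.pyGet? s i
      then PySem.List.pyGetD st.2 (j + 1) 0 + 1 else 0)) ++ [0]
  let row := PySem.List.sorted (PySem.List.slice cur none (some (PySem.Str.len s))) (fun x => x) true
  let best :=
    (PySem.List.pyRange 0 (PySem.Str.len s)).foldl
      (fun b k =>
        if (k + 1) * PySem.List.pyGetD row k 0 > b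
        then (k + 1) * PySem.List.pyGetD row k 0 else b) st.1
  (best, cur)

-- one step of the outer loop, on the invariant state
theorem pv_step_eq (s : String) (m : Nat) (hm : m < s.toList.length) (b : Int) :
    pvStep s (b, pvRow s.toList (m + 1)) (m : Int)
      = (List.foldl max b (pvVals s.toList m), pvRow s.toList m) := by
  rw [pvStep]
  dsimp only
  rw [pv_cur s m hm, pv_row_sorted s m, pv_inner, pvVals]

-- B's outer loop, unrolled: the invariant is that the carried row is pvRow for the next start
theorem pv_loop (s : String) (m : Nat) (hm : m ≤ s.toList.length) (b : Int) :
    (PySem.List.pyRange ((m : Int) - 1) (-1) (-1)).foldl (pvStep s) (b, pvRow s.toList m)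
      = (List.foldl max b (((List.range m).reverse).flatMap (pvVals s.toList)), pvRow s.toList 0) := by
  induction m generalizing b with
  | zero =>
    rw [PySem.List.pyRange_neg_one_eq_nil (by omega)]
    simp
  | succ m ih =>
    have hcons : PySem.List.pyRange (((m + 1 : Nat) : Int) - 1) (-1) (-1)
        = (m : Int) :: PySem.List.pyRange ((m : Int) - 1) (-1) (-1) := by
      have h' : (((m + 1 : Nat) : Int) - 1) = (m : Int) := by push_cast; ring
      rw [h', PySem.List.pyRange_neg_one_cons (by omega)]
    rw [hcons, List.foldl_cons, pv_step_eq s m (by omega) b, ih (by omega)]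
    rw [List.range_succ, List.reverse_append, List.reverse_singleton, List.singleton_append,
      List.flatMap_cons, List.foldl_append]

-- B's result, structurally
theorem pvB_eq (s : String) :
    maximize_string_function_naive_space_alt s
      = List.foldl max 0 (((List.range s.toList.length).reverse).flatMap (pvVals s.toList)) := by
  have hinit : PySem.List.pyRepeat [(0 : Int)] (PySem.Str.len s + 1) = pvRow s.toList s.toList.length := by
    rw [PySem.List.pyRepeat_singleton, pvRow]
    have h1 : (PySem.Str.len s + 1).toNat = s.toList.length + 1 := by
      rw [PySem.Str.len_eq]; omega
    rw [h1]
    refine (List.eq_replicate_iff.2 ⟨by simp, ?_⟩).symm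
    intro b hb
    obtain ⟨j, _, rfl⟩ := List.mem_map.1 hb
    rw [show pvLce s.toList s.toList.length j = 0 from by rw [pvLce, List.drop_length]; rfl]
    rfl
  have hrange : PySem.Str.len s - 1 = ((s.toList.length : Nat) : Int) - 1 := by
    rw [PySem.Str.len_eq]
  rw [show maximize_string_function_naive_space_alt s
      = ((PySem.List.pyRange (PySem.Str.len s - 1) (-1) (-1)).foldl (pvStep s)
          (0, PySem.List.pyRepeat [(0 : Int)] (PySem.Str.len s + 1))).1 from rfl,
    hinit, hrange, pv_loop s s.toList.length (le_refl _) 0]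

-- running max with base 0 over two mutually dominated lists is equal
theorem pv_max_eq (l1 l2 : List Int)
    (h1 : ∀ x ∈ l1, x ≤ List.foldl max 0 l2) (h2 : ∀ x ∈ l2, x ≤ List.foldl max 0 l1) :
    List.foldl max 0 l1 = List.foldl max 0 l2 := by
  have b1 : (0 : Int) ≤ List.foldl max 0 l1 := (PySem.List.le_foldl_max l1 0).1
  have b2 : (0 : Int) ≤ List.foldl max 0 l2 := (PySem.List.le_foldl_max l2 0).1
  refine le_antisymm ?_ ?_
  · rcases PySem.List.foldl_max_mem l1 0 with h | h
    · rw [h]; exact b2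
    · exact h1 _ h
  · rcases PySem.List.foldl_max_mem l2 0 with h | h
    · rw [h]; exact b1
    · exact h2 _ h

-- ===== VERDICT (by name: the statement is the Claim_ definition above) =====
theorem maximize_string_function_naive_space_spec : Claim_equal_maximize_string_function_naive_space := by
  intro s _hdom
  unfold Spec_maximize_string_function_naive_space
  rw [pvA_eq, pvB_eq]
  set cs := s.toList with hcs
  set n := cs.length with hn
  have hns : PySem.Str.len s = (n : Int) := by rw [PySem.Str.len_eq]
  refine pv_max_eq _ _ ?_ ?_
  · -- every A-value is dominated by a B-value
    intro x hx
    obtain ⟨k, hk, rfl⟩ := List.mem_map.1 hx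
    have hkA : k ∈ pvSubsA s := (PySem.Set.mem_ofList _ _).1 hk
    obtain ⟨i, L, hL, hiL, rfl⟩ := (pv_mem_subsA_iff s k).1 hkA
    rw [pv_fA s i L hL hiL]
    set c := pvCnt cs i L with hc
    have hin : i < n := by omega
    have hc1 : 1 ≤ c := by
      have hmem : i ∈ List.range n := List.mem_range.2 hin
      have hpi : (fun j => decide (L ≤ pvLce cs j i)) i = true := by
        simp only [decide_eq_true_eq, pvLce_self]
        omega
      have hpos : 0 < (List.range n).countP (fun j => decide (L ≤ pvLce cs j i)) :=
        List.countP_pos_iff.2 ⟨i, hmem, hpi⟩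
      rw [hc, pvCnt, ← hn]
      omega
    have hcn : c ≤ n := by
      rw [hc, pvCnt, ← hn]
      exact le_trans List.countP_le_length (by simp)
    set c1 : Nat := c - 1 with hc1def
    have hclt : c1 < (pvSRow cs i).length := by rw [pv_length_sRow]; omega
    have hge : (L : Int) ≤ (pvSRow cs i)[c1] :=
      pv_sorted_getElem_ge _ (pv_sRow_desc cs i) _ c (pv_countP_sRow cs i L) hc1 hclt
    have hyB : ((c1 : Int) + 1) * PySem.List.pyGetD (pvSRow cs i) (c1 : Int) 0
        ∈ ((List.range n).reverse).flatMap (pvVals cs) := by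
      refine List.mem_flatMap.2 ⟨i, by simp [hin], ?_⟩
      exact List.mem_map.2 ⟨c1, List.mem_range.2 (by omega), rfl⟩
    have hgd : PySem.List.pyGetD (pvSRow cs i) (c1 : Int) 0 = (pvSRow cs i)[c1] := by
      rw [PySem.List.pyGetD_natCast, List.getD_eq_getElem _ _ hclt]
    refine le_trans ?_ ((PySem.List.le_foldl_max _ 0).2 _ hyB)
    rw [hgd]
    have hcc : (c1 : Int) + 1 = (c : Int) := by omega
    rw [hcc]
    calc (L : Int) * (c : Int) ≤ (pvSRow cs i)[c1] * (c : Int) :=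
          mul_le_mul_of_nonneg_right hge (by positivity)
      _ = (c : Int) * (pvSRow cs i)[c1] := mul_comm _ _
  · -- every B-value is dominated by an A-value
    intro x hx
    obtain ⟨i, hi, hx2⟩ := List.mem_flatMap.1 hx
    have hin : i < n := List.mem_range.1 (List.mem_reverse.1 hi)
    obtain ⟨k, hkr, rfl⟩ := List.mem_map.1 hx2
    have hkn : k < n := List.mem_range.1 hkr
    have hklt : k < (pvSRow cs i).length := by rw [pv_length_sRow]; omega
    have hgd : PySem.List.pyGetD (pvSRow cs i) (k : Int) 0 = (pvSRow cs i)[k] := by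
      rw [PySem.List.pyGetD_natCast, List.getD_eq_getElem _ _ hklt]
    rw [hgd]
    rcases le_or_gt ((pvSRow cs i)[k]) 0 with hle | hpos
    · exact le_trans (mul_nonpos_of_nonneg_of_nonpos (by positivity) hle)
        (PySem.List.le_foldl_max _ 0).1
    · -- the entry is some lce value; it names a valid substring length
      have hmemv : (pvSRow cs i)[k] ∈ pvSRow cs i := List.getElem_mem _
      have hmemv2 : (pvSRow cs i)[k] ∈ (List.range n).map (fun j => (pvLce cs i j : Int)) :=
        (PySem.List.sorted_perm _ _ _).mem_iff.1 hmemv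
      obtain ⟨j, _, hval⟩ := List.mem_map.1 hmemv2
      set L := pvLce cs i j with hLdef
      have hLval : (pvSRow cs i)[k] = (L : Int) := hval.symm
      have hL1 : 1 ≤ L := by
        by_contra hcon
        have : L = 0 := by omega
        rw [hLval, this] at hpos
        simp at hpos
      have hiL : i + L ≤ n := by
        have := pvLce_le_left cs i j
        omega
      have hcge : k + 1 ≤ pvCnt cs i L := by
        rw [← pv_countP_sRow cs i L]
        exact pv_sorted_count_ge _ (pv_sRow_desc cs i) k hklt _ (by rw [hLval])
      have hkA : PySem.Str.slice s (some (i : Int)) (some ((i : Int) + (L : Int)))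
          ∈ (PySem.Set.ofList (pvSubsA s) : List String) :=
        (PySem.Set.mem_ofList _ _).2
          ((pv_mem_subsA_iff s _).2 ⟨i, L, hL1, by omega, rfl⟩)
      have hyA : pvF s (PySem.Str.slice s (some (i : Int)) (some ((i : Int) + (L : Int))))
          ∈ (PySem.Set.ofList (pvSubsA s) : List String).map (pvF s) :=
        List.mem_map.2 ⟨_, hkA, rfl⟩
      refine le_trans ?_ ((PySem.List.le_foldl_max _ 0).2 _ hyA)
      rw [pv_fA s i L hL1 (by omega), hLval]
      calc ((k : Int) + 1) * (L : Int) ≤ (pvCnt cs i L : Int) * (L : Int) :=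
            mul_le_mul_of_nonneg_right (by exact_mod_cast hcge) (by positivity)
        _ = (L : Int) * (pvCnt cs i L : Int) := mul_comm _ _
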